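-- pv_equiv track=rewrite | github.com/2012monk/42 | Rush01/ex00/test_gen.py | count_boxes
-- ===== SOURCE A (Python) =====
-- SIZE = 4
--
-- def count_boxes(a):
--     if not a:
--         return 0
--     mx = 0
--     cnt = 0
--     for i in range(SIZE):
--         if mx > a[i]:
--             continue
--         mx = a[i]
--         cnt += 1
--     return cnt
-- ===== SOURCE B (Python) =====
-- SIZE = 4
--
-- def count_boxes(a):
--     if not a:
--         return 0
--     return sum(1 for i in range(SIZE) if a[i] >= max([0] + list(a[:i])))
-- ===== Notes on version B (the rewrite author's own statement) =====
-- stated objective: alternative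
-- what changed: Replaces the stateful running-max loop (mx/cnt accumulators with continue) by a stateless sum over range(SIZE) that tests each element against the max of its prefix seeded with the 0 baseline, recomputing the prefix maximum instead of maintaining it.
import Mathlib
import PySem

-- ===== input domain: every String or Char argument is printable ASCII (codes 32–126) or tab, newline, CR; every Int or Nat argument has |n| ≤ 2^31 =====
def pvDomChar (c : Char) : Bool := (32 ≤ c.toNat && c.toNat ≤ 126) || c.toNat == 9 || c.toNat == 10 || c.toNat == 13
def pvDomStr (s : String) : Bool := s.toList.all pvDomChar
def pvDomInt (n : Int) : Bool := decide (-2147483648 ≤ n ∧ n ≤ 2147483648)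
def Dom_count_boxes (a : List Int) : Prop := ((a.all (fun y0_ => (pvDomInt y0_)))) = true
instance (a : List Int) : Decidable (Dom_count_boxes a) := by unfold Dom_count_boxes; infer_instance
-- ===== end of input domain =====

-- B recomputes the prefix maximum (seeded with 0) for each index instead of A's running mx/cnt state machine; same value on all admitted inputs.
-- ===== PORT A =====
def count_boxes (a : List Int) : Int :=
  if a = [] then 0
  else
    ((PySem.List.pyRange 0 4 1).foldl
      (fun (st : Int × Int) i =>
        let ai := PySem.List.pyGetD a i 0
        if st.1 > ai then st else (ai, st.2 + 1))
      (0, 0)).2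

-- ===== PORT B =====
def count_boxes_alt (a : List Int) : Int :=
  if a = [] then 0
  else
    (PySem.List.pyRange 0 4 1).foldl
      (fun cnt i =>
        let ai := PySem.List.pyGetD a i 0
        if ai ≥ (PySem.List.max? ((0 : Int) :: PySem.List.slice a none (some i)) (fun y => y)).getD 0
        then cnt + 1 else cnt)
      0

-- ===== PRECONDITION & SPEC =====
-- Pre_ excludes non-empty lists shorter than 4, on which both Pythons raise IndexError.
def Pre_count_boxes (a : List Int) : Prop := a = [] ∨ 4 ≤ a.length
instance (a : List Int) : Decidable (Pre_count_boxes a) := by unfold Pre_count_boxes; infer_instance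
def pvWitness_count_boxes : List Int := [1, 2, 3, 4]
def Spec_count_boxes (a : List Int) (out : Int) : Prop := out = count_boxes_alt a
instance (a : List Int) (out : Int) : Decidable (Spec_count_boxes a out) := by unfold Spec_count_boxes; infer_instance

-- ===== CLAIM (what is proved, stated in full; the proofs are below) =====
def Claim_equal_count_boxes : Prop := ∀ (a : List Int), Dom_count_boxes a → Pre_count_boxes a → Spec_count_boxes a (count_boxes a)

-- ===== LEMMAS AND PROOFS =====

-- ===== VERDICT (by name: the statement is the Claim_ definition above) =====
theorem count_boxes_spec : Claim_equal_count_boxes := by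
  intro a _ hpre
  unfold Spec_count_boxes
  rcases hpre with h | h
  · subst h; decide
  · match a, h with
    | x0 :: x1 :: x2 :: x3 :: t, _ =>
      simp only [count_boxes, count_boxes_alt, PySem.List.pyRange]
      norm_num [show (4:Int).toNat = 4 from rfl, show (3:Int).toNat = 3 from rfl,
        show (2:Int).toNat = 2 from rfl, show (1:Int).toNat = 1 from rfl,
        List.range_succ, PySem.List.pyGetD_natCast, PySem.List.pyGetD_ofNat',
        PySem.List.slice_to, PySem.List.max?_id_cons, List.getD, List.take_succ_cons]
      rw [if_neg (List.cons_ne_nil _ _), if_neg (List.cons_ne_nil _ _)]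
      split_ifs <;> omega
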